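-- pv_equiv track=rewrite | github.com/Kotoad/OmniBoard_Studio | FileManager.py | _compare_device_group
-- ===== SOURCE A (Python) =====
-- def _compare_device_group(saved_devs, current_devs):
--     """Compare a group of devices (main or function)"""
--
--     # Find added
--     for did, c_dev in current_devs.items():
--         if did not in saved_devs:
--             return True
--         else:
--             # Check for modifications
--             s_dev = saved_devs[did]
--             if c_dev != s_dev:
--                 return True
--
--     # Find removed
--     for did in saved_devs:
--         if did not in current_devs:
--             return True
--
--     return False
-- ===== SOURCE B (Python) =====
-- def _compare_device_group(saved_devs, current_devs):
--     """Compare a group of devices (main or function)"""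
--     def canon(devs):
--         return sorted(
--             ((did, sorted(dev.items(), key=lambda kv: kv[0])) for did, dev in devs.items()),
--             key=lambda kv: kv[0])
--     return canon(saved_devs) != canon(current_devs)
-- ===== Notes on version B (the rewrite author's own statement) =====
-- stated objective: alternative
-- what changed: A scans current with membership lookups into saved plus a second removed-key loop; B instead builds a canonical sorted representation of each group (devices sorted by id, each device's items sorted by key) and returns whether the two canonical forms differ, with no lookups or early returns at all.
import Mathlib
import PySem

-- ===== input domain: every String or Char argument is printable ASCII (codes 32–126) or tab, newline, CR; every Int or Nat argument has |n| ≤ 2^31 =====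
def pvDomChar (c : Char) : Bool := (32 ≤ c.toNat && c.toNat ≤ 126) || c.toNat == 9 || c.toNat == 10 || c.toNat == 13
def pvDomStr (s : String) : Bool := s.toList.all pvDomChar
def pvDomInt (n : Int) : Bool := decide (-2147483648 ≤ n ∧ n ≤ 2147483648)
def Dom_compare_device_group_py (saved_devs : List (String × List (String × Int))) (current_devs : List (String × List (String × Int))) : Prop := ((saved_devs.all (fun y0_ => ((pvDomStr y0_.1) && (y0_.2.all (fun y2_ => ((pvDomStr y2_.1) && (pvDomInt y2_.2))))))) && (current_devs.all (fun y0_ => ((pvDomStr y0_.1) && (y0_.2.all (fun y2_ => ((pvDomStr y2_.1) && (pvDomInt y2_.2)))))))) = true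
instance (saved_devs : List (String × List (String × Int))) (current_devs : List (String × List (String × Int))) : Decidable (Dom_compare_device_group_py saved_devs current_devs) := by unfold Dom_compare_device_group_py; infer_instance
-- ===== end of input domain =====

-- B replaces A's lookup loops by a canonical key-sorted representation of each group, compared once; return value only, no side effects.

-- A-side helper: Python dict equality on the device dicts (ignores insertion order).
def pvDictEq (a b : List (String × Int)) : Bool :=
  let da := PySem.Dict.ofList a
  let db := PySem.Dict.ofList b
  da.size == db.size && da.items.all (fun kv => db.get? kv.1 == some kv.2)

-- ===== PORT A =====
def compare_device_group_py (saved_devs : List (String × List (String × Int))) (current_devs : List (String × List (String × Int))) : Bool :=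
  let s := PySem.Dict.ofList saved_devs
  let c := PySem.Dict.ofList current_devs
  -- Find added (and modified): first loop, early return True
  if c.items.any (fun kv =>
      if !(s.contains kv.1) then true
      else !(pvDictEq kv.2 (s.getD kv.1 []))) then true
  -- Find removed: second loop
  else s.keys.any (fun k => !(c.contains k))

-- ===== PORT B =====
-- canon's inner sort: sorted(dev.items(), key=lambda kv: kv[0])
def pvNormVal (v : List (String × Int)) : List (String × Int) :=
  PySem.List.sorted (PySem.Dict.ofList v).items (fun kv => kv.1) false

-- canon(devs): sorted((did, sorted(dev.items(), key=…)) for did, dev in devs.items()), key=lambda kv: kv[0]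
def pvCanon (devs : List (String × List (String × Int))) : List (String × List (String × Int)) :=
  PySem.List.sorted ((PySem.Dict.ofList devs).items.map (fun kv => (kv.1, pvNormVal kv.2))) (fun kv => kv.1) false

def compare_device_group_py_alt (saved_devs : List (String × List (String × Int))) (current_devs : List (String × List (String × Int))) : Bool :=
  decide (pvCanon saved_devs ≠ pvCanon current_devs)

-- ===== PRECONDITION & SPEC =====
def Spec_compare_device_group_py (saved_devs : List (String × List (String × Int))) (current_devs : List (String × List (String × Int))) (out : Bool) : Prop := out = compare_device_group_py_alt saved_devs current_devs
instance (saved_devs : List (String × List (String × Int))) (current_devs : List (String × List (String × Int))) (out : Bool) : Decidable (Spec_compare_device_group_py saved_devs current_devs out) := by unfold Spec_compare_device_group_py; infer_instance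

-- ===== CLAIM (what is proved, stated in full; the proofs are below) =====
def Claim_equal_compare_device_group_py : Prop := ∀ (saved_devs : List (String × List (String × Int))) (current_devs : List (String × List (String × Int))), Dom_compare_device_group_py saved_devs current_devs → Spec_compare_device_group_py saved_devs current_devs (compare_device_group_py saved_devs current_devs)

-- ===== LEMMAS AND PROOFS =====

-- Two fst-nodup pairs lists have equal key-sorted forms iff they are permutations of each other.
theorem pv_sorted_key_eq_iff_perm {β : Type} [DecidableEq β]
    (xs ys : List (String × β))
    (hx : (xs.map Prod.fst).Nodup) (_hy : (ys.map Prod.fst).Nodup) :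
    PySem.List.sorted xs (fun kv => kv.1) false = PySem.List.sorted ys (fun kv => kv.1) false ↔ xs.Perm ys := by
  constructor
  · intro h
    have p1 := PySem.List.sorted_perm xs (fun kv => kv.1) false
    have p2 := PySem.List.sorted_perm ys (fun kv => kv.1) false
    exact p1.symm.trans (h ▸ p2)
  · intro hperm
    set S := PySem.List.sorted xs (fun kv => kv.1) false with hS
    have pS : S.Perm xs := PySem.List.sorted_perm xs (fun kv => kv.1) false
    have hle : S.Pairwise (fun a b => a.1 ≤ b.1) := PySem.List.sorted_pairwise xs (fun kv => kv.1)
    have hnodS : (S.map Prod.fst).Nodup := ((pS.map Prod.fst).nodup_iff).mpr hx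
    have hne : S.Pairwise (fun a b => a.1 ≠ b.1) := List.pairwise_map.mp hnodS
    have hlt : S.Pairwise (fun a b => a.1 < b.1) :=
      (hle.and hne).imp (fun h => lt_of_le_of_ne h.1 h.2)
    exact (PySem.List.sorted_eq_of_perm_of_pairwise_lt ys S (fun kv => kv.1) (pS.trans hperm) hlt).symm

-- keys.Nodup restated as a Nodup of the items' firsts
theorem pv_nodup_fst (a : List (String × List (String × Int))) :
    ((PySem.Dict.ofList a).items.map Prod.fst).Nodup := by
  have := PySem.Dict.nodup_keys_ofList a
  simpa [PySem.Dict.keys] using this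

theorem pv_nodup_fst_int (a : List (String × Int)) :
    ((PySem.Dict.ofList a).items.map Prod.fst).Nodup := by
  have := PySem.Dict.nodup_keys_ofList a
  simpa [PySem.Dict.keys] using this

-- pvDictEq is dict equality: the items of the two dicts are permutations of each other.
theorem pv_dictEq_iff_perm (a b : List (String × Int)) :
    pvDictEq a b = true ↔ (PySem.Dict.ofList a).items.Perm (PySem.Dict.ofList b).items := by
  constructor
  · intro h
    simp only [pvDictEq, Bool.and_eq_true, beq_iff_eq, List.all_eq_true] at h
    obtain ⟨hsz, hall⟩ := h
    have hsub : (PySem.Dict.ofList a).items ⊆ (PySem.Dict.ofList b).items := by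
      intro kv hkv
      have h1 : (PySem.Dict.ofList b).get? kv.1 = some kv.2 := by simpa using hall kv hkv
      exact PySem.Dict.mem_items_of_get?_eq_some _ h1
    have hsp := List.subperm_of_subset (List.Nodup.of_map Prod.fst (pv_nodup_fst_int a)) hsub
    exact hsp.perm_of_length_le (le_of_eq (by simpa [PySem.Dict.size] using hsz.symm))
  · intro hperm
    simp only [pvDictEq, Bool.and_eq_true, beq_iff_eq, List.all_eq_true]
    refine ⟨by simpa [PySem.Dict.size] using hperm.length_eq, ?_⟩
    intro kv hkv
    have hm : (kv.1, kv.2) ∈ (PySem.Dict.ofList b).items := by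
      exact hperm.mem_iff.mp hkv
    simpa using PySem.Dict.get?_of_mem_items _ hm (PySem.Dict.nodup_keys_ofList b)

-- pvDictEq holds iff the two canonical (key-sorted, dedup'd) forms coincide.
theorem pv_dictEq_iff_norm (a b : List (String × Int)) :
    pvDictEq a b = true ↔ pvNormVal a = pvNormVal b := by
  rw [pvNormVal, pvNormVal,
    pv_sorted_key_eq_iff_perm _ _ (pv_nodup_fst_int a) (pv_nodup_fst_int b),
    pv_dictEq_iff_perm]

-- ===== VERDICT (by name: the statement is the Claim_ definition above) =====
theorem compare_device_group_py_spec : Claim_equal_compare_device_group_py := by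
  intro saved current _
  unfold Spec_compare_device_group_py compare_device_group_py compare_device_group_py_alt pvCanon
  set s := PySem.Dict.ofList saved with hs
  set c := PySem.Dict.ofList current with hc
  have hks : s.keys.Nodup := PySem.Dict.nodup_keys_ofList saved
  have hkc : c.keys.Nodup := PySem.Dict.nodup_keys_ofList current
  set f : String × List (String × Int) → String × List (String × Int) :=
    fun kv => (kv.1, pvNormVal kv.2) with hf
  have hms : ((s.items.map f).map Prod.fst).Nodup := by
    simpa [List.map_map, Function.comp_def, hf] using pv_nodup_fst saved
  have hmc : ((c.items.map f).map Prod.fst).Nodup := by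
    simpa [List.map_map, Function.comp_def, hf] using pv_nodup_fst current
  rw [Bool.eq_iff_iff]
  simp only [decide_eq_true_eq, ne_eq]
  rw [pv_sorted_key_eq_iff_perm _ _ hms hmc,
    List.perm_ext_iff_of_nodup (List.Nodup.of_map Prod.fst hms) (List.Nodup.of_map Prod.fst hmc)]
  -- characterize A = false
  have main : (if c.items.any (fun kv =>
        if !(s.contains kv.1) then true
        else !(pvDictEq kv.2 (s.getD kv.1 []))) then true
      else s.keys.any (fun k => !(c.contains k))) = false ↔
      (∀ p, p ∈ s.items.map f ↔ p ∈ c.items.map f) := by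
    have hsplit : ∀ {b1 b2 : Bool}, ((if b1 then true else b2) = false ↔ (b1 = false ∧ b2 = false)) := by
      intro b1 b2; cases b1 <;> simp
    rw [hsplit]
    have hA1 : (c.items.any (fun kv =>
        if !(s.contains kv.1) then true
        else !(pvDictEq kv.2 (s.getD kv.1 []))) = false) ↔
        ∀ kv ∈ c.items, s.contains kv.1 = true ∧ pvDictEq kv.2 (s.getD kv.1 []) = true := by
      simp only [List.any_eq_false]
      refine forall_congr' (fun kv => forall_congr' (fun _ => ?_))
      cases s.contains kv.1 <;> simp
    have hA2 : (s.keys.any (fun k => !(c.contains k)) = false) ↔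
        ∀ k ∈ s.keys, c.contains k = true := by
      simp [List.any_eq_false]
    rw [hA1, hA2]
    constructor
    · rintro ⟨h1, h2⟩ p
      constructor
      · rintro hp
        obtain ⟨kv, hkv, rfl⟩ := List.mem_map.mp hp
        have hk : kv.1 ∈ s.keys := by
          simp only [PySem.Dict.keys, List.mem_map]; exact ⟨kv, hkv, rfl⟩
        have hcc : kv.1 ∈ c.keys := (PySem.Dict.contains_iff_mem_keys c kv.1).mp (h2 kv.1 hk)
        obtain ⟨w, hkw⟩ : ∃ x, (kv.1, x) ∈ c.items := by simpa [PySem.Dict.keys] using hcc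
        have hdq := (h1 (kv.1, w) hkw).2
        have hgd : s.getD kv.1 [] = kv.2 :=
          PySem.Dict.getD_of_mem_items s (by simpa using hkv) hks []
        rw [hgd] at hdq
        have hnv : pvNormVal w = pvNormVal kv.2 := (pv_dictEq_iff_norm _ _).mp hdq
        exact List.mem_map.mpr ⟨(kv.1, w), hkw, by simp [hf, hnv]⟩
      · rintro hp
        obtain ⟨kv, hkv, rfl⟩ := List.mem_map.mp hp
        have hcont := (h1 kv hkv).1
        have hdq := (h1 kv hkv).2
        have hkmem : kv.1 ∈ s.keys := (PySem.Dict.contains_iff_mem_keys s kv.1).mp hcont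
        obtain ⟨w, hkw⟩ : ∃ x, (kv.1, x) ∈ s.items := by simpa [PySem.Dict.keys] using hkmem
        have hgd : s.getD kv.1 [] = w :=
          PySem.Dict.getD_of_mem_items s hkw hks []
        rw [hgd] at hdq
        have hnv : pvNormVal kv.2 = pvNormVal w := (pv_dictEq_iff_norm _ _).mp hdq
        exact List.mem_map.mpr ⟨(kv.1, w), hkw, by simp [hf, hnv]⟩
    · intro hall
      constructor
      · intro kv hkv
        have hm : f kv ∈ s.items.map f := (hall (f kv)).mpr (List.mem_map.mpr ⟨kv, hkv, rfl⟩)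
        obtain ⟨kw, hkw, heq⟩ := List.mem_map.mp hm
        have h1 : kw.1 = kv.1 := by simpa [hf] using congrArg Prod.fst heq
        have h2 : pvNormVal kw.2 = pvNormVal kv.2 := by simpa [hf] using congrArg Prod.snd heq
        have hcont : s.contains kv.1 = true := by
          rw [PySem.Dict.contains_iff_mem_keys]
          simp only [PySem.Dict.keys, List.mem_map]
          exact ⟨kw, hkw, h1⟩
        refine ⟨hcont, ?_⟩
        have hgd : s.getD kv.1 [] = kw.2 := by
          rw [← h1]
          exact PySem.Dict.getD_of_mem_items s (by simpa using hkw) hks []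
        rw [hgd]
        exact (pv_dictEq_iff_norm _ _).mpr h2.symm
      · intro k hk
        obtain ⟨v, hkv⟩ : ∃ x, (k, x) ∈ s.items := by simpa [PySem.Dict.keys] using hk
        have hm : f (k, v) ∈ c.items.map f := (hall (f (k, v))).mp (List.mem_map.mpr ⟨(k, v), hkv, rfl⟩)
        obtain ⟨kw, hkw, heq⟩ := List.mem_map.mp hm
        have h1 : kw.1 = k := by simpa [hf] using congrArg Prod.fst heq
        rw [PySem.Dict.contains_iff_mem_keys]
        simp only [PySem.Dict.keys, List.mem_map]
        exact ⟨kw, hkw, h1⟩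
  constructor
  · intro hT hall
    have := main.mpr hall
    rw [hT] at this
    cases this
  · intro hnP
    cases hE : (if c.items.any (fun kv =>
        if !(s.contains kv.1) then true
        else !(pvDictEq kv.2 (s.getD kv.1 []))) then true
      else s.keys.any (fun k => !(c.contains k))) with
    | false => exact absurd (main.mp hE) hnP
    | true => rfl
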